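-- pv_equiv track=rewrite | github.com/remilvus/4chanObserver | observer.py | filter_links
-- ===== SOURCE A (Python) =====
-- def filter_links(links, desired_keys):
--     link_keys = [set(link.split('/')[-1].lower().split('-')) for link in links]
--     desired_links = []
--
--     for link, keywords in zip(links, link_keys):
--         for main_key, keys in desired_keys.items():
--             if keywords & keys:
--                 desired_links.append({"link": link, "dir": main_key})
--                 break
--     return desired_links
-- ===== SOURCE B (Python) =====
-- def filter_links(links, desired_keys):
--     # Precompute keyword -> (earliest group index, its dir name); then one dict
--     # lookup per link keyword instead of scanning all groups per link.
--     first_group = {}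
--     for i, (main_key, keys) in enumerate(desired_keys.items()):
--         for k in keys:
--             if k not in first_group:
--                 first_group[k] = (i, main_key)
--     desired_links = []
--     for link in links:
--         kws = link.split('/')[-1].lower().split('-')
--         best = None
--         for k in kws:
--             hit = first_group.get(k)
--             if hit is not None and (best is None or hit[0] < best[0]):
--                 best = hit
--         if best is not None:
--             desired_links.append({"link": link, "dir": best[1]})
--     return desired_links
-- ===== Notes on version B (the rewrite author's own statement) =====
-- stated objective: faster
-- what changed: Instead of intersecting every link's keyword set with every group's key set (break on first hit), B builds once a keyword->(earliest group index, dir) dict and, per link, takes the minimum-index hit over the link's keywords.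
import Mathlib
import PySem

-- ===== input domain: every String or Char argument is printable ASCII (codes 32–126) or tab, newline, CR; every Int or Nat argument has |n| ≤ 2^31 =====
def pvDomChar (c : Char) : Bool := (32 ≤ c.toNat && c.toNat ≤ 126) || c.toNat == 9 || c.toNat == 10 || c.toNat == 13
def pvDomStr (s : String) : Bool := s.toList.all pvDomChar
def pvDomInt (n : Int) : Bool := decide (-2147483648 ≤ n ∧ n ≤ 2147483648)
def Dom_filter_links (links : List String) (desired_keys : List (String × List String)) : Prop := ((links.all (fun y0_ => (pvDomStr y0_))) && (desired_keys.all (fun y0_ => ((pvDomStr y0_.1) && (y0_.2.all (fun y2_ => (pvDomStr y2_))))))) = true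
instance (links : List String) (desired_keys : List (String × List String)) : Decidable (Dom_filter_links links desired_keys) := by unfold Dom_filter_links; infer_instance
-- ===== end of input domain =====

-- B replaces A's per-link scan over all key groups by a precomputed keyword -> (earliest group index, dir) dict (objective: faster).

-- ===== PORT A =====
-- link.split('/')[-1].lower().split('-')  (split('/') is never empty, so pyGet? (-1) is always some; .getD "" is unreachable; sep literals are nonempty so split? is always some)
def pvKws (link : String) : List String :=
  (PySem.Str.split? (PySem.Str.lower ((PySem.List.pyGet? ((PySem.Str.split? link "/").getD []) (-1)).getD "")) "-").getD []

-- inner 'for main_key, keys in desired_keys.items(): if keywords & keys: … break'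
def pvAFirst (keywords : PySem.Set String) : List (String × List String) → Option String
  | [] => none
  | (main_key, keys) :: rest =>
      if (PySem.Set.inter keywords keys).isEmpty then pvAFirst keywords rest
      else some main_key

def filter_links (links : List String) (desired_keys : List (String × List String)) : List (List (String × String)) :=
  let link_keys := links.map (fun link => PySem.Set.ofList (pvKws link))
  (links.zip link_keys).foldl
    (fun desired_links lk =>
      match pvAFirst lk.2 desired_keys with
      | some main_key => desired_links ++ [[("link", lk.1), ("dir", main_key)]]
      | none => desired_links) []

-- ===== PORT B =====
-- kws = link.split('/')[-1].lower().split('-')  (same comment as pvKws; B's own copy of its Python line)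
def pvBKws (link : String) : List String :=
  (PySem.Str.split? (PySem.Str.lower ((PySem.List.pyGet? ((PySem.Str.split? link "/").getD []) (-1)).getD "")) "-").getD []

-- first_group: keyword -> (earliest group index, its dir name)
def pvBBuild : Int → List (String × List String) → PySem.Dict String (Int × String) → PySem.Dict String (Int × String)
  | _, [], d => d
  | i, (main_key, keys) :: rest, d =>
      pvBBuild (i + 1) rest
        (keys.foldl (fun d k => if d.contains k then d else d.insert k (i, main_key)) d)

-- per-link scan: keep the hit with the smallest group index
def pvBBest (d : PySem.Dict String (Int × String)) (kws : List String) : Option (Int × String) :=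
  kws.foldl
    (fun best k =>
      match d.get? k with
      | none => best
      | some hit =>
          match best with
          | none => some hit
          | some b => if hit.1 < b.1 then some hit else some b) none

def filter_links_alt (links : List String) (desired_keys : List (String × List String)) : List (List (String × String)) :=
  let fg := pvBBuild 0 desired_keys PySem.Dict.empty
  links.foldl
    (fun desired_links link =>
      match pvBBest fg (pvBKws link) with
      | some hit => desired_links ++ [[("link", link), ("dir", hit.2)]]
      | none => desired_links) []

-- ===== PRECONDITION & SPEC =====
def Spec_filter_links (links : List String) (desired_keys : List (String × List String)) (out : List (List (String × String))) : Prop := out = filter_links_alt links desired_keys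
instance (links : List String) (desired_keys : List (String × List String)) (out : List (List (String × String))) : Decidable (Spec_filter_links links desired_keys out) := by unfold Spec_filter_links; infer_instance

-- ===== CLAIM (what is proved, stated in full; the proofs are below) =====
def Claim_equal_filter_links : Prop := ∀ (links : List String) (desired_keys : List (String × List String)), Dom_filter_links links desired_keys → Spec_filter_links links desired_keys (filter_links links desired_keys)

-- ===== LEMMAS AND PROOFS =====

-- specification: first group (from index i) whose key set meets kws, with its index
def pvFind (i : Int) (kws : List String) : List (String × List String) → Option (Int × String)
  | [] => none
  | (mk, keys) :: rest =>
      if kws.any (fun k => keys.contains k) then some (i, mk) else pvFind (i + 1) kws rest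

def pvOptMin (a b : Option (Int × String)) : Option (Int × String) :=
  match a, b with
  | none, b => b
  | a, none => a
  | some x, some y => if y.1 < x.1 then some y else some x

theorem pvFind_ge (i : Int) (kws : List String) (g : List (String × List String)) (p : Int × String)
    (h : pvFind i kws g = some p) : i ≤ p.1 := by
  induction g generalizing i with
  | nil => simp [pvFind] at h
  | cons hd tl ih =>
    obtain ⟨mk, keys⟩ := hd
    simp only [pvFind] at h
    split at h
    · cases h; simp
    · have := ih (i + 1) h; omega

theorem pvAFirst_eq (kws : List String) (g : List (String × List String)) (i : Int) :
    pvAFirst (PySem.Set.ofList kws) g = (pvFind i kws g).map Prod.snd := by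
  induction g generalizing i with
  | nil => simp [pvAFirst, pvFind]
  | cons hd tl ih =>
    obtain ⟨mk, keys⟩ := hd
    simp only [pvAFirst, pvFind]
    have hiff : (PySem.Set.inter (PySem.Set.ofList kws) keys).isEmpty = true ↔
        ¬ (kws.any (fun k => keys.contains k) = true) := by
      simp only [List.isEmpty_iff, List.eq_nil_iff_forall_not_mem, List.any_eq_true]
      constructor
      · rintro h ⟨k, hk, hk2⟩
        exact h k (by simp [PySem.Set.mem_inter, PySem.Set.mem_ofList, hk, List.contains_iff_mem.mp hk2])
      · intro h k hk
        rw [PySem.Set.mem_inter, PySem.Set.mem_ofList] at hk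
        exact h ⟨k, hk.1, List.contains_iff_mem.mpr hk.2⟩
    by_cases hc : kws.any (fun k => keys.contains k) = true
    · rw [if_neg (fun h => (hiff.mp h) hc), if_pos hc]; rfl
    · rw [if_pos (hiff.mpr hc), if_neg hc, ih (i + 1)]

-- dict lookup after one group's key-list fold
theorem pvBuild_step (keys : List String) (d : PySem.Dict String (Int × String)) (v : Int × String) (k : String) :
    (keys.foldl (fun d k' => if d.contains k' then d else d.insert k' v) d).get? k
      = ((d.get? k).or (if keys.contains k then some v else none)) := by
  induction keys generalizing d with
  | nil => cases h : d.get? k <;> simp [h]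
  | cons x xs ih =>
    simp only [List.foldl_cons]
    rw [ih]
    by_cases hdk : d.contains x = true
    · rw [if_pos hdk]
      by_cases hkx : k = x
      · subst hkx
        rw [PySem.Dict.contains_eq_isSome_get?] at hdk
        cases hv : d.get? k
        · rw [hv] at hdk; simp at hdk
        · simp
      · simp [List.contains_eq_mem, hkx]
    · rw [if_neg hdk]
      by_cases hkx : k = x
      · subst hkx
        rw [PySem.Dict.contains_eq_isSome_get?] at hdk
        cases hv : d.get? k
        · simp [PySem.Dict.get?_insert_self]
        · rw [hv] at hdk; simp at hdk
      · rw [PySem.Dict.get?_insert_of_ne _ _ hkx]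
        simp [List.contains_eq_mem, hkx]

theorem pvBuild_get (g : List (String × List String)) (i : Int) (d : PySem.Dict String (Int × String)) (k : String) :
    (pvBBuild i g d).get? k = ((d.get? k).or (pvFind i [k] g)) := by
  induction g generalizing i d with
  | nil => cases h : d.get? k <;> simp [pvBBuild, pvFind, h]
  | cons hd tl ih =>
    obtain ⟨mk, keys⟩ := hd
    simp only [pvBBuild, pvFind]
    rw [ih, pvBuild_step]
    have : ([k].any (fun k' => keys.contains k')) = keys.contains k := by simp
    rw [this]
    cases d.get? k <;> cases hck : keys.contains k <;> simp

theorem pvOptMin_none_right (a : Option (Int × String)) : pvOptMin a none = a := by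
  cases a <;> rfl

theorem pvFind_nil_kws (i : Int) (g : List (String × List String)) : pvFind i [] g = none := by
  induction g generalizing i with
  | nil => rfl
  | cons hd tl ih =>
    obtain ⟨mk, keys⟩ := hd
    simp [pvFind, ih]

theorem pvOptMin_assoc (a b c : Option (Int × String)) :
    pvOptMin (pvOptMin a b) c = pvOptMin a (pvOptMin b c) := by
  cases a <;> cases b <;> cases c <;>
    simp only [pvOptMin] <;> (try split_ifs) <;>
    (try simp only [pvOptMin]) <;> (try split_ifs) <;> first | rfl | omega

-- minimum over keyword hits = first matching group
theorem pvMin_cons (k : String) (kws : List String) (g : List (String × List String)) (i : Int) :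
    pvOptMin (pvFind i [k] g) (pvFind i kws g) = pvFind i (k :: kws) g := by
  induction g generalizing i with
  | nil => rfl
  | cons hd tl ih =>
    obtain ⟨mk, keys⟩ := hd
    simp only [pvFind, List.any_cons, List.any_nil, Bool.or_false]
    by_cases hk : keys.contains k = true <;>
      by_cases ha : (kws.any fun k' => keys.contains k') = true
    · rw [if_pos hk, if_pos ha, if_pos (by simp_all)]
      exact if_neg (lt_irrefl _)
    · rw [if_pos hk, if_neg ha, if_pos (by simp_all)]
      cases hf : pvFind (i + 1) kws tl with
      | none => rfl
      | some p =>
        have := pvFind_ge _ _ _ _ hf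
        simp only [pvOptMin]
        rw [if_neg (by omega)]
    · rw [if_neg hk, if_pos ha, if_pos (by simp_all)]
      cases hf : pvFind (i + 1) [k] tl with
      | none => rfl
      | some p =>
        have := pvFind_ge _ _ _ _ hf
        simp only [pvOptMin]
        rw [if_pos (by omega)]
    · rw [if_neg hk, if_neg ha, if_neg (by simp_all), ih]

theorem pvBBest_fold (d : PySem.Dict String (Int × String)) (g : List (String × List String))
    (hd : ∀ k, d.get? k = pvFind 0 [k] g) (kws : List String) (acc : Option (Int × String)) :
    kws.foldl
      (fun best k =>
        match d.get? k with
        | none => best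
        | some hit =>
            match best with
            | none => some hit
            | some b => if hit.1 < b.1 then some hit else some b) acc
      = pvOptMin acc (pvFind 0 kws g) := by
  induction kws generalizing acc with
  | nil => rw [List.foldl_nil, pvFind_nil_kws, pvOptMin_none_right]
  | cons k kws ih =>
    simp only [List.foldl_cons]
    have hstep : (match d.get? k with
        | none => acc
        | some hit =>
            match acc with
            | none => some hit
            | some b => if hit.1 < b.1 then some hit else some b) = pvOptMin acc (d.get? k) := by
      cases d.get? k <;> cases acc <;> rfl
    rw [hstep, ih, pvOptMin_assoc, hd k, pvMin_cons]

theorem pvBBest_eq (g : List (String × List String)) (kws : List String) :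
    pvBBest (pvBBuild 0 g PySem.Dict.empty) kws = pvFind 0 kws g := by
  unfold pvBBest
  rw [pvBBest_fold]
  · rfl
  · intro k
    rw [pvBuild_get]
    rfl

theorem pvStep_eq (g : List (String × List String)) (link : String)
    (acc : List (List (String × String))) :
    (match pvAFirst (PySem.Set.ofList (pvKws link)) g with
     | some main_key => acc ++ [[("link", link), ("dir", main_key)]]
     | none => acc)
    = (match pvBBest (pvBBuild 0 g PySem.Dict.empty) (pvBKws link) with
     | some hit => acc ++ [[("link", link), ("dir", hit.2)]]
     | none => acc) := by
  rw [show pvBKws link = pvKws link from rfl, pvBBest_eq, pvAFirst_eq _ _ 0]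
  cases pvFind 0 (pvKws link) g <;> rfl

-- ===== VERDICT (by name: the statement is the Claim_ definition above) =====
theorem pvFold_eq (g : List (String × List String)) (links : List String)
    (acc : List (List (String × String))) :
    (links.zip (links.map fun link => PySem.Set.ofList (pvKws link))).foldl
      (fun desired_links lk =>
        match pvAFirst lk.2 g with
        | some main_key => desired_links ++ [[("link", lk.1), ("dir", main_key)]]
        | none => desired_links) acc
    = links.foldl
      (fun desired_links link =>
        match pvBBest (pvBBuild 0 g PySem.Dict.empty) (pvBKws link) with
        | some hit => desired_links ++ [[("link", link), ("dir", hit.2)]]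
        | none => desired_links) acc := by
  induction links generalizing acc with
  | nil => rfl
  | cons l ls ih =>
    simp only [List.map_cons, List.zip_cons_cons, List.foldl_cons]
    rw [ih]
    exact congrArg
      (fun a => ls.foldl
        (fun desired_links link =>
          match pvBBest (pvBBuild 0 g PySem.Dict.empty) (pvBKws link) with
          | some hit => desired_links ++ [[("link", link), ("dir", hit.2)]]
          | none => desired_links) a)
      (pvStep_eq g l acc)

-- ===== VERDICT (by name: the statement is the Claim_ definition above) =====
theorem filter_links_spec : Claim_equal_filter_links := by
  intro links desired_keys _
  show filter_links links desired_keys = filter_links_alt links desired_keys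
  exact pvFold_eq desired_keys links []
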